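-- pv_equiv track=rewrite | github.com/nisdh2916/NutrAI | ai/rag_engine/rag_pipeline.py | _strip_think_streaming
-- ===== SOURCE A (Python) =====
-- def _strip_think_streaming(buffer: str, in_think: bool) -> tuple[str, str, bool]:
--     """스트리밍 청크에서 <think> 태그를 상태 머신으로 실시간 제거"""
--     output = ""
--     while True:
--         if not in_think:
--             idx = buffer.find("<think>")
--             if idx == -1:
--                 output += buffer
--                 buffer = ""
--                 break
--             output += buffer[:idx]
--             buffer = buffer[idx + 7:]
--             in_think = True
--         else:
--             idx = buffer.find("</think>")
--             if idx == -1: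
--                 buffer = ""
--                 break
--             buffer = buffer[idx + 8:]
--             in_think = False
--     return output, buffer, in_think
-- ===== SOURCE B (Python) =====
-- def _strip_think_streaming(buffer: str, in_think: bool) -> tuple[str, str, bool]:
--     """Single split on '</think>' plus one '<think>' scan per segment, instead of
--     the while-loop find/slice state machine."""
--     out = ""
--     parts = buffer.split("</think>")
--     for k, p in enumerate(parts):
--         last = k == len(parts) - 1
--         if in_think:
--             # this segment is inside a think span; the separator (if any) closes it
--             in_think = False
--             if last:
--                 return (out, "", True)
--         else:
--             i = p.find("<think>")
--             if i == -1:
--                 out += p if last else p + "</think>"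
--             else:
--                 out += p[:i]
--                 if last:
--                     return (out, "", True)
--                 # the separator after this segment closes the span just opened
--     return (out, "", False)
-- ===== Notes on version B (the rewrite author's own statement) =====
-- stated objective: alternative
-- what changed: Replaces A's while-loop state machine (alternating find('<think>')/find('</think>') with repeated slicing and a mutated in_think flag) by a single split on '</think>' followed by one pass over the resulting segments, each segment needing only one '<think>' scan.
import Mathlib
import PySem

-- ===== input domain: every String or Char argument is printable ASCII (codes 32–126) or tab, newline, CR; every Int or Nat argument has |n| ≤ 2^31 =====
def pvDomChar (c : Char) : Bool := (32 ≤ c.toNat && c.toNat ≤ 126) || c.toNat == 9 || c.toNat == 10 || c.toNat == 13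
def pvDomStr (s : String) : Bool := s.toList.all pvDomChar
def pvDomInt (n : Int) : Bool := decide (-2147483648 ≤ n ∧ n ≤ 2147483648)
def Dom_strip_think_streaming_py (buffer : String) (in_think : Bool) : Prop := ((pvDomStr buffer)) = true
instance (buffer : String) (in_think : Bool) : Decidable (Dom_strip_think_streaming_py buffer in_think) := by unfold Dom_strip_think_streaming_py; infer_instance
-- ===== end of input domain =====

-- B replaces A's while-loop find/slice state machine with one split on "</think>"
-- followed by a single pass over the segments (objective: alternative decomposition,
-- same asymptotic cost).

def pvOpenT : List Char := "<think>".toList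
def pvCloseT : List Char := "</think>".toList

-- termination fact cited by pvALoop's decreasing_by
theorem pv_slice_find_lt (s sub : List Char) (k : Int) (hk : 1 ≤ k) (hsub : sub ≠ [])
    (h : PySem.Chars.find s sub ≠ -1) :
    (PySem.List.slice s (some (PySem.Chars.find s sub + k)) none).length < s.length := by
  have h0 : 0 ≤ PySem.Chars.find s sub := by
    have := PySem.Chars.neg_one_le_find s sub; omega
  obtain ⟨hpre, -⟩ := PySem.Chars.find_spec h0
  have hs1 : 1 ≤ sub.length := List.length_pos_iff.mpr hsub
  have hlen := hpre.length_le
  simp only [List.length_drop] at hlen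
  have hle := PySem.Chars.find_le_length s sub
  rw [PySem.List.slice_from s (by omega : (0:Int) ≤ PySem.Chars.find s sub + k)]
  simp only [List.length_drop]
  omega

-- ===== PORT A =====
def pvALoop (buffer : List Char) (in_think : Bool) (output : List Char) :
    List Char × List Char × Bool :=
  if in_think = false then
    let idx := PySem.Chars.find buffer pvOpenT
    if h : idx = -1 then (output ++ buffer, [], in_think)
    else pvALoop (PySem.List.slice buffer (some (idx + 7)) none) true
      (output ++ PySem.List.slice buffer none (some idx))
  else
    let idx := PySem.Chars.find buffer pvCloseT
    if h : idx = -1 then (output, [], in_think)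
    else pvALoop (PySem.List.slice buffer (some (idx + 8)) none) false output
termination_by buffer.length
decreasing_by
  · exact pv_slice_find_lt buffer pvOpenT 7 (by omega) (by decide) h
  · exact pv_slice_find_lt buffer pvCloseT 8 (by omega) (by decide) h

def strip_think_streaming_py (buffer : String) (in_think : Bool) : String × String × Bool :=
  let r := pvALoop buffer.toList in_think []
  (String.ofList r.1, String.ofList r.2.1, r.2.2)

-- ===== PORT B =====
def pvBGo (in_think : Bool) (out : List Char) (parts : List (List Char)) :
    List Char × List Char × Bool :=
  match parts with
  | [] => (out, [], false)
  | p :: rest =>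
    if in_think then
      if rest.isEmpty then (out, [], true) else pvBGo false out rest
    else
      let i := PySem.Chars.find p pvOpenT
      if i = -1 then
        pvBGo in_think (out ++ p ++ (if rest.isEmpty then [] else pvCloseT)) rest
      else if rest.isEmpty then (out ++ PySem.List.slice p none (some i), [], true)
      else pvBGo in_think (out ++ PySem.List.slice p none (some i)) rest

def strip_think_streaming_py_alt (buffer : String) (in_think : Bool) : String × String × Bool :=
  let r := pvBGo in_think [] (PySem.Chars.splitOn buffer.toList pvCloseT)
  (String.ofList r.1, String.ofList r.2.1, r.2.2)

-- ===== PRECONDITION & SPEC =====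
def Spec_strip_think_streaming_py (buffer : String) (in_think : Bool) (out : String × String × Bool) : Prop := out = strip_think_streaming_py_alt buffer in_think
instance (buffer : String) (in_think : Bool) (out : String × String × Bool) : Decidable (Spec_strip_think_streaming_py buffer in_think out) := by unfold Spec_strip_think_streaming_py; infer_instance

-- ===== CLAIM (what is proved, stated in full; the proofs are below) =====
def Claim_equal_strip_think_streaming_py : Prop := ∀ (buffer : String) (in_think : Bool), Dom_strip_think_streaming_py buffer in_think → Spec_strip_think_streaming_py buffer in_think (strip_think_streaming_py buffer in_think)

-- ===== LEMMAS AND PROOFS =====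

-- find s sub = m when sub occurs (as a prefix of a drop) first at m
theorem pv_find_eq (s sub : List Char) (m : Nat) (h1 : sub <+: s.drop m)
    (h2 : ∀ i < m, ¬ sub <+: s.drop i) : PySem.Chars.find s sub = (m : Int) := by
  have hinf : sub <:+: s := h1.isInfix.trans (List.drop_suffix m s).isInfix
  have hne : PySem.Chars.find s sub ≠ -1 :=
    fun he => (PySem.Chars.find_eq_neg_one_iff s sub).mp he hinf
  have h0 : 0 ≤ PySem.Chars.find s sub := by
    have := PySem.Chars.neg_one_le_find s sub; omega
  obtain ⟨hp, hmin⟩ := PySem.Chars.find_spec h0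
  rcases Nat.lt_trichotomy (PySem.Chars.find s sub).toNat m with h | h | h
  · exact absurd hp (h2 _ h)
  · omega
  · exact absurd h1 (hmin m h)

theorem pv_not_infix_drop (s sub : List Char) (k : Nat) (h : ¬ sub <:+: s) :
    ¬ sub <:+: s.drop k := fun hi => h (hi.trans (List.drop_suffix k s).isInfix)

theorem pv_find_drop_neg (s sub : List Char) (k : Nat)
    (h : PySem.Chars.find s sub = -1) : PySem.Chars.find (s.drop k) sub = -1 := by
  rw [PySem.Chars.find_eq_neg_one_iff] at h ⊢
  exact pv_not_infix_drop s sub k h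

theorem pv_find_drop (s sub : List Char) (k : Nat)
    (h0 : 0 ≤ PySem.Chars.find s sub) (hk : (k : Int) ≤ PySem.Chars.find s sub) :
    PySem.Chars.find (s.drop k) sub = PySem.Chars.find s sub - k := by
  obtain ⟨hp, hmin⟩ := PySem.Chars.find_spec h0
  set f := PySem.Chars.find s sub with hf
  have := pv_find_eq (s.drop k) sub (f.toNat - k)
    (by rw [List.drop_drop]; have : k + (f.toNat - k) = f.toNat := by omega
        rw [this]; exact hp)
    (by intro i hi hpre
        rw [List.drop_drop] at hpre
        exact hmin (k + i) (by omega) hpre)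
  omega

-- a prefix of (s.take c).drop i is a prefix of s.drop i
theorem pv_prefix_of_take (s sub : List Char) (c i : Nat) (hsub : sub ≠ [])
    (h : sub <+: (s.take c).drop i) : sub <+: s.drop i ∧ sub.length + i ≤ c := by
  rw [List.drop_take, List.prefix_take_iff] at h
  have hs1 : 1 ≤ sub.length := List.length_pos_iff.mpr hsub
  exact ⟨h.1, by omega⟩

theorem pv_find_take_pos (s sub : List Char) (c : Nat)
    (h0 : 0 ≤ PySem.Chars.find s sub)
    (hc : (PySem.Chars.find s sub).toNat + sub.length ≤ c) :
    PySem.Chars.find (s.take c) sub = PySem.Chars.find s sub := by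
  obtain ⟨hp, hmin⟩ := PySem.Chars.find_spec h0
  set f := PySem.Chars.find s sub with hf
  have := pv_find_eq (s.take c) sub f.toNat
    (by rw [List.drop_take, List.prefix_take_iff]
        exact ⟨hp, by omega⟩)
    (by intro i hi hpre
        rw [List.drop_take, List.prefix_take_iff] at hpre
        exact hmin i hi (hpre.1))
  omega

theorem pv_find_take_neg (s sub : List Char) (c : Nat) (hsub : sub ≠ [])
    (h : PySem.Chars.find s sub = -1 ∨ (c : Int) < PySem.Chars.find s sub) :
    PySem.Chars.find (s.take c) sub = -1 := by
  rw [PySem.Chars.find_eq_neg_one_iff]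
  intro hinf
  obtain ⟨i, -, hpre⟩ : ∃ i, i ≤ (s.take c).length ∧ sub <+: (s.take c).drop i := by
    rcases hinf with ⟨u, v, huv⟩
    exact ⟨u.length, by simp [← huv], v, by simp [← huv]⟩
  obtain ⟨hps, hlen⟩ := pv_prefix_of_take s sub c i hsub hpre
  rcases h with h | h
  · rw [PySem.Chars.find_eq_neg_one_iff] at h
    exact h (hps.isInfix.trans (List.drop_suffix i s).isInfix)
  · have h0 : 0 ≤ PySem.Chars.find s sub := by
      have := PySem.Chars.neg_one_le_find s sub; omega
    obtain ⟨-, hmin⟩ := PySem.Chars.find_spec h0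
    exact hmin i (by omega) hps

-- characters of s under a prefix-of-drop occurrence
theorem pv_char_at (s sub : List Char) (m i : Nat) (h : sub <+: s.drop m)
    (hi : i < sub.length) : s[m + i]? = sub[i]? := by
  rcases h with ⟨t, ht⟩
  rw [← List.getElem?_drop, ← ht, List.getElem?_append_left hi]

-- no occurrence of "<think>" and "</think>" overlaps
theorem pv_no_overlap (s : List Char)
    (ho : 0 ≤ PySem.Chars.find s pvOpenT) (hc : 0 ≤ PySem.Chars.find s pvCloseT) :
    PySem.Chars.find s pvOpenT + 7 ≤ PySem.Chars.find s pvCloseT ∨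
    PySem.Chars.find s pvCloseT + 8 ≤ PySem.Chars.find s pvOpenT := by
  obtain ⟨hpo, -⟩ := PySem.Chars.find_spec ho
  obtain ⟨hpc, -⟩ := PySem.Chars.find_spec hc
  set o := (PySem.Chars.find s pvOpenT).toNat with hodef
  set c := (PySem.Chars.find s pvCloseT).toNat with hcdef
  by_contra hcon
  push_neg at hcon
  obtain ⟨h1, h2⟩ := hcon
  rcases Nat.lt_trichotomy o c with hlt | heq | hlt
  · -- o < c ≤ o + 6
    have hd1 : 1 ≤ c - o := by omega
    have e1 := pv_char_at s pvOpenT o (c - o) hpo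
      (by rw [show pvOpenT.length = 7 from rfl]; omega)
    have e2 := pv_char_at s pvCloseT c 0 hpc (by decide)
    have : o + (c - o) = c + 0 := by omega
    rw [this, e2] at e1
    have hlt7 : c - o < 7 := by omega
    interval_cases h : c - o <;> simp_all [pvOpenT, pvCloseT]
  · have e1 := pv_char_at s pvOpenT o 1 hpo (by decide)
    have e2 := pv_char_at s pvCloseT c 1 hpc (by decide)
    rw [heq] at e1
    rw [e1] at e2
    simp [pvOpenT, pvCloseT] at e2
  · -- c < o ≤ c + 7
    have hd1 : 1 ≤ o - c := by omega
    have e1 := pv_char_at s pvCloseT c (o - c) hpc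
      (by rw [show pvCloseT.length = 8 from rfl]; omega)
    have e2 := pv_char_at s pvOpenT o 0 hpo (by decide)
    have : c + (o - c) = o + 0 := by omega
    rw [this, e2] at e1
    have hlt8 : o - c < 8 := by omega
    interval_cases h : o - c <;> simp_all [pvOpenT, pvCloseT]

-- take through a close-tag occurrence
theorem pv_take_close (s : List Char) (c : Nat) (h : pvCloseT <+: s.drop c)
    (hc : c ≤ s.length) : s.take (c + 8) = s.take c ++ pvCloseT := by
  rcases h with ⟨t, ht⟩
  conv_lhs => rw [← List.take_append_drop c s, ← ht]
  have hlen : (s.take c).length = c := by simp [hc]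
  rw [List.take_append, hlen, List.take_of_length_le (by rw [hlen]; omega)]
  congr 1
  have h8 : c + 8 - c = 8 := by omega
  rw [h8, List.take_append, show (8 - pvCloseT.length : Nat) = 0 from rfl,
      List.take_zero, List.append_nil, List.take_of_length_le (by rw [show pvCloseT.length = 8 from rfl])]

-- fuel-free version of PySem.Chars.splitOn for sep = "</think>"
def pvCloseSplit (l cur : List Char) : List (List Char) :=
  match l with
  | [] => [cur.reverse]
  | ch :: rest =>
    if pvCloseT.isPrefixOf (ch :: rest) then
      cur.reverse :: pvCloseSplit ((ch :: rest).drop pvCloseT.length) []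
    else pvCloseSplit rest (ch :: cur)
termination_by l.length
decreasing_by
  · simp [show pvCloseT.length = 8 from rfl]
  · simp

theorem pv_go_eq (fuel : Nat) : ∀ (l cur : List Char) (acc : List (List Char)),
    l.length ≤ fuel →
    PySem.Chars.splitOn.go pvCloseT fuel l cur acc = acc.reverse ++ pvCloseSplit l cur := by
  induction fuel with
  | zero =>
    intro l cur acc hl
    have : l = [] := by cases l <;> simp_all
    subst this
    simp [PySem.Chars.splitOn.go, pvCloseSplit]
  | succ fuel ih =>
    intro l cur acc hl
    cases l with
    | nil => simp [PySem.Chars.splitOn.go, pvCloseSplit]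
    | cons ch rest =>
      rw [PySem.Chars.splitOn.go]
      by_cases hp : pvCloseT.isPrefixOf (ch :: rest)
      · rw [if_pos hp, ih _ _ _ (by simp [show pvCloseT.length = 8 from rfl] at hl ⊢; omega)]
        rw [pvCloseSplit, if_pos hp]
        simp
      · rw [if_neg hp, ih _ _ _ (by simp at hl ⊢; omega)]
        rw [pvCloseSplit, if_neg hp]

theorem pv_splitOn_eq (s : List Char) :
    PySem.Chars.splitOn s pvCloseT = pvCloseSplit s [] := by
  rw [PySem.Chars.splitOn, pv_go_eq (s.length + 1) s [] [] (by omega)]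
  rfl

theorem pv_closeSplit_char (n : Nat) : ∀ (l cur : List Char), l.length ≤ n →
    pvCloseSplit l cur =
      if PySem.Chars.find l pvCloseT = -1 then [cur.reverse ++ l]
      else (cur.reverse ++ l.take (PySem.Chars.find l pvCloseT).toNat) ::
        pvCloseSplit (l.drop ((PySem.Chars.find l pvCloseT).toNat + 8)) [] := by
  induction n with
  | zero =>
    intro l cur hl
    have : l = [] := by cases l <;> simp_all
    subst this
    simp [pvCloseSplit]
    decide
  | succ n ih =>
    intro l cur hl
    cases l with
    | nil => simp [pvCloseSplit]; decide
    | cons ch rest =>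
      by_cases hp : pvCloseT.isPrefixOf (ch :: rest)
      · have hf : PySem.Chars.find (ch :: rest) pvCloseT = (0 : Int) := by
          apply pv_find_eq _ _ 0
          · simpa using List.isPrefixOf_iff_prefix.mp hp
          · omega
        rw [pvCloseSplit, if_pos hp, hf]
        simp [show pvCloseT.length = 8 from rfl]
      · have hnp : ¬ pvCloseT <+: (ch :: rest) := fun h => hp (List.isPrefixOf_iff_prefix.mpr h)
        rw [pvCloseSplit, if_neg hp, ih rest (ch :: cur) (by simp at hl; omega)]
        by_cases hrf : PySem.Chars.find rest pvCloseT = -1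
        · have hf : PySem.Chars.find (ch :: rest) pvCloseT = -1 := by
            rw [PySem.Chars.find_eq_neg_one_iff] at hrf ⊢
            intro hinf
            rcases List.infix_cons_iff.mp hinf with h | h
            · exact hnp h
            · exact hrf h
          rw [if_pos hrf, if_pos hf]
          simp
        · have h0 : 0 ≤ PySem.Chars.find rest pvCloseT := by
            have := PySem.Chars.neg_one_le_find rest pvCloseT; omega
          obtain ⟨hrp, hrmin⟩ := PySem.Chars.find_spec h0
          have hf : PySem.Chars.find (ch :: rest) pvCloseT =
              ((PySem.Chars.find rest pvCloseT).toNat + 1 : Nat) := by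
            apply pv_find_eq
            · simpa using hrp
            · intro i hi
              cases i with
              | zero => simpa using hnp
              | succ j =>
                simp only [List.drop_succ_cons]
                exact hrmin j (by omega)
          rw [if_neg hrf, if_neg (by rw [hf]; omega), hf]
          have htn : (((PySem.Chars.find rest pvCloseT).toNat + 1 : Nat) : Int).toNat
              = (PySem.Chars.find rest pvCloseT).toNat + 1 := by omega
          rw [htn]
          simp

theorem pv_closeSplit_ne_nil (l cur : List Char) : pvCloseSplit l cur ≠ [] := by
  rw [pv_closeSplit_char l.length l cur le_rfl]
  split <;> simp

-- the one-step characterisation of split, as used by the main induction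
theorem pv_split_step (s : List Char) :
    PySem.Chars.splitOn s pvCloseT =
      if PySem.Chars.find s pvCloseT = -1 then [s]
      else s.take (PySem.Chars.find s pvCloseT).toNat ::
        PySem.Chars.splitOn (s.drop ((PySem.Chars.find s pvCloseT).toNat + 8)) pvCloseT := by
  rw [pv_splitOn_eq, pv_closeSplit_char s.length s [] le_rfl, pv_splitOn_eq]
  split <;> simp

-- A's loop passes a close tag through untouched when no open tag precedes it
theorem pv_pass_through (s out : List Char)
    (hc : 0 ≤ PySem.Chars.find s pvCloseT)
    (ho : PySem.Chars.find s pvOpenT = -1 ∨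
      PySem.Chars.find s pvCloseT + 8 ≤ PySem.Chars.find s pvOpenT) :
    pvALoop s false out =
      pvALoop (s.drop ((PySem.Chars.find s pvCloseT).toNat + 8)) false
        (out ++ s.take ((PySem.Chars.find s pvCloseT).toNat + 8)) := by
  have hcl := PySem.Chars.find_le_length s pvCloseT
  rcases ho with ho | ho
  · -- no open tag at all: both sides return everything appended
    have ho' : PySem.Chars.find (s.drop ((PySem.Chars.find s pvCloseT).toNat + 8)) pvOpenT = -1 :=
      pv_find_drop_neg s pvOpenT _ ho
    rw [pvALoop, pvALoop]
    simp [ho, ho', List.append_assoc]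
  · -- first open tag strictly after the close tag: one step on each side meets
    have ho0 : 0 ≤ PySem.Chars.find s pvOpenT := by
      have := PySem.Chars.neg_one_le_find s pvCloseT; omega
    have hd := pv_find_drop s pvOpenT ((PySem.Chars.find s pvCloseT).toNat + 8) ho0 (by omega)
    rw [pvALoop, pvALoop]
    simp only [Bool.false_eq_true, if_false, reduceIte, hd]
    rw [dif_neg (by omega), dif_neg (by omega)]
    set o := PySem.Chars.find s pvOpenT with hodef
    set c := PySem.Chars.find s pvCloseT with hcdef
    rw [PySem.List.slice_from _ (by omega : (0:Int) ≤ o + 7),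
        PySem.List.slice_from _ (by omega : (0:Int) ≤ o - ↑(c.toNat + 8) + 7),
        PySem.List.slice_to _ (by omega : (0:Int) ≤ o),
        PySem.List.slice_to _ (by omega : (0:Int) ≤ o - ↑(c.toNat + 8))]
    rw [List.drop_drop]
    have e1 : c.toNat + 8 + (o - ↑(c.toNat + 8) + 7).toNat = (o + 7).toNat := by omega
    rw [e1]
    congr 1
    rw [List.append_assoc]
    congr 1
    have e2 : o.toNat = (c.toNat + 8) + (o - ↑(c.toNat + 8)).toNat := by omega
    rw [e2, List.take_add]

-- main equivalence, by strong induction on the buffer length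
theorem pv_main (n : Nat) : ∀ (s : List Char), s.length ≤ n → ∀ (t : Bool) (out : List Char),
    pvALoop s t out = pvBGo t out (PySem.Chars.splitOn s pvCloseT) := by
  induction n using Nat.strong_induction_on with
  | _ n ih =>
  intro s hs t out
  rw [pv_split_step]
  by_cases hcf : PySem.Chars.find s pvCloseT = -1
  · rw [if_pos hcf]
    cases t with
    | true =>
      rw [pvALoop]
      simp [pvBGo, hcf]
    | false =>
      by_cases ho : PySem.Chars.find s pvOpenT = -1
      · rw [pvALoop]
        simp [pvBGo, ho]
      · have ho0 : 0 ≤ PySem.Chars.find s pvOpenT := by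
          have := PySem.Chars.neg_one_le_find s pvOpenT; omega
        have hcd : PySem.Chars.find
            (s.drop ((PySem.Chars.find s pvOpenT + 7).toNat)) pvCloseT = -1 :=
          pv_find_drop_neg s pvCloseT _ hcf
        rw [pvALoop, if_pos rfl, dif_neg ho, pvALoop,
          if_neg (by decide : ¬(true = false))]
        rw [PySem.List.slice_from _ (by omega : (0:Int) ≤ PySem.Chars.find s pvOpenT + 7)]
        rw [dif_pos hcd]
        simp [pvBGo, ho]
  · rw [if_neg hcf]
    have hc0 : 0 ≤ PySem.Chars.find s pvCloseT := by
      have := PySem.Chars.neg_one_le_find s pvCloseT; omega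
    have hcl := PySem.Chars.find_le_length s pvCloseT
    obtain ⟨hpreC, -⟩ := PySem.Chars.find_spec hc0
    have hlen8 : 8 ≤ s.length - (PySem.Chars.find s pvCloseT).toNat := by
      have := hpreC.length_le
      simp only [List.length_drop] at this
      exact le_trans (by decide) this
    have hne : PySem.Chars.splitOn
        (s.drop ((PySem.Chars.find s pvCloseT).toNat + 8)) pvCloseT ≠ [] := by
      rw [pv_splitOn_eq]; exact pv_closeSplit_ne_nil _ _
    have hrest : (PySem.Chars.splitOn
        (s.drop ((PySem.Chars.find s pvCloseT).toNat + 8)) pvCloseT).isEmpty = false := by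
      simpa [List.isEmpty_iff] using hne
    have ihd : ∀ out' : List Char,
        pvALoop (s.drop ((PySem.Chars.find s pvCloseT).toNat + 8)) false out' =
          pvBGo false out' (PySem.Chars.splitOn
            (s.drop ((PySem.Chars.find s pvCloseT).toNat + 8)) pvCloseT) := by
      intro out'
      exact ih (s.length - ((PySem.Chars.find s pvCloseT).toNat + 8)) (by omega) _
        (by simp) false out'
    cases t with
    | true =>
      rw [pvALoop, if_neg (by decide : ¬(true = false)), dif_neg hcf,
        PySem.List.slice_from _ (by omega : (0:Int) ≤ PySem.Chars.find s pvCloseT + 8)]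
      have e1 : (PySem.Chars.find s pvCloseT + 8).toNat
          = (PySem.Chars.find s pvCloseT).toNat + 8 := by omega
      rw [e1, ihd]
      rw [pvBGo, if_pos rfl, hrest]
      simp [pvBGo]
    | false =>
      have hcase : (PySem.Chars.find s pvOpenT = -1 ∨
          PySem.Chars.find s pvCloseT + 8 ≤ PySem.Chars.find s pvOpenT) ∨
          (0 ≤ PySem.Chars.find s pvOpenT ∧
            PySem.Chars.find s pvOpenT + 7 ≤ PySem.Chars.find s pvCloseT) := by
        by_cases ho : PySem.Chars.find s pvOpenT = -1
        · exact Or.inl (Or.inl ho)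
        · have ho0 : 0 ≤ PySem.Chars.find s pvOpenT := by
            have := PySem.Chars.neg_one_le_find s pvOpenT; omega
          rcases pv_no_overlap s ho0 hc0 with h | h
          · exact Or.inr ⟨ho0, h⟩
          · exact Or.inl (Or.inr h)
      rcases hcase with hpass | ⟨ho0, hoc⟩
      · -- close tag comes first: A passes it through, B emits segment + separator
        have hitake : PySem.Chars.find
            (s.take ((PySem.Chars.find s pvCloseT).toNat)) pvOpenT = -1 := by
          apply pv_find_take_neg s pvOpenT _ (by decide)
          rcases hpass with h | h
          · exact Or.inl h
          · right; omega
        rw [pv_pass_through s out hc0 hpass, ihd]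
        rw [pvBGo, if_neg (by decide : ¬(false = true)), if_pos hitake, hrest,
          if_neg (by decide : ¬(false = true))]
        congr 1
        rw [List.append_assoc]
        congr 1
        exact pv_take_close s _ hpreC (by omega)
      · -- open tag comes first: both sides strip the think span up to the close tag
        have hitake : PySem.Chars.find
            (s.take ((PySem.Chars.find s pvCloseT).toNat)) pvOpenT
            = PySem.Chars.find s pvOpenT := by
          apply pv_find_take_pos s pvOpenT _ ho0
          rw [show pvOpenT.length = 7 from rfl]; omega
        have hone : PySem.Chars.find s pvOpenT ≠ -1 := by omega
        have hdropc : PySem.Chars.find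
            (s.drop ((PySem.Chars.find s pvOpenT).toNat + 7)) pvCloseT
            = PySem.Chars.find s pvCloseT - ((PySem.Chars.find s pvOpenT).toNat + 7) :=
          pv_find_drop s pvCloseT _ hc0 (by omega)
        rw [pvALoop, if_pos rfl, dif_neg hone, pvALoop,
          if_neg (by decide : ¬(true = false))]
        rw [PySem.List.slice_from _ (by omega : (0:Int) ≤ PySem.Chars.find s pvOpenT + 7),
          show (PySem.Chars.find s pvOpenT + 7).toNat
            = (PySem.Chars.find s pvOpenT).toNat + 7 from by omega]
        rw [dif_neg (by omega), PySem.List.slice_from _ (by omega :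
          (0:Int) ≤ PySem.Chars.find (s.drop ((PySem.Chars.find s pvOpenT).toNat + 7)) pvCloseT + 8)]
        rw [List.drop_drop, hdropc,
          show (PySem.Chars.find s pvOpenT).toNat + 7 +
            (PySem.Chars.find s pvCloseT - ((PySem.Chars.find s pvOpenT).toNat + 7) + 8).toNat
            = (PySem.Chars.find s pvCloseT).toNat + 8 from by omega]
        rw [ihd]
        rw [pvBGo, if_neg (by decide : ¬(false = true)), hitake, if_neg hone, hrest,
          if_neg (by decide : ¬(false = true))]
        rw [PySem.List.slice_to _ ho0, PySem.List.slice_to _ ho0, List.take_take,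
          show min (PySem.Chars.find s pvOpenT).toNat (PySem.Chars.find s pvCloseT).toNat
            = (PySem.Chars.find s pvOpenT).toNat from by omega]

-- ===== VERDICT (by name: the statement is the Claim_ definition above) =====
theorem strip_think_streaming_py_spec : Claim_equal_strip_think_streaming_py := by
  intro buffer in_think _
  unfold Spec_strip_think_streaming_py strip_think_streaming_py strip_think_streaming_py_alt
  rw [pv_main buffer.toList.length buffer.toList le_rfl]
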